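-- pv_equiv track=rewrite | github.com/alexisnlh/Challenge-Plus-Python | digram_optimizer.py | find_max_digram_distance
-- ===== SOURCE A (Python) =====
-- from typing import Dict, Optional, Tuple
--
-- def find_max_digram_distance(str_var: str) -> int:
--     """
--         Encuentra la distancia máxima entre digramas idénticos
--         Args:
--             str_var: String de entrada (solo letras minúsculas)
--         Returns:
--             Distancia máxima entre digramas idénticos, o -1 si no existen
--     """
--     # Validación básica
--     if len(str_var) < 2:
--         return -1
--
--     # Diccionario para almacenar la primera aparición de cada digrama
--     first_occurrence: Dict[str, int] = dict()
--     max_distance = 0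
--
--     # Recorre el string generando digramas
--     for idx in range(len(str_var) - 1):
--         digram = str_var[idx:idx + 2]
--
--         if digram in first_occurrence:
--             # Calcula distancia desde la primera aparición
--             distance = idx - first_occurrence[digram]
--             max_distance = max(max_distance, distance)
--         else:
--             # Almacena la primera aparición
--             first_occurrence[digram] = idx
--
--     return max_distance if max_distance > 0 else -1
-- ===== SOURCE B (Python) =====
-- def _positions(digrams, d):
--     return [i for i, e in enumerate(digrams) if e == d]
--
-- def find_max_digram_distance(str_var: str) -> int:
--     # Per-digram aggregation: for each distinct digram, its span is
--     # (last occurrence - first occurrence); the answer is the largest span, or -1.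
--     digrams = list(zip(str_var, str_var[1:]))
--     best = -1
--     for d in set(digrams):
--         pos = _positions(digrams, d)
--         span = pos[-1] - pos[0]
--         if span > best:
--             best = span
--     return best if best > 0 else -1
-- ===== Notes on version B (the rewrite author's own statement) =====
-- stated objective: alternative
-- what changed: A makes one interleaved scan that records each digram's first occurrence in a dict while updating a running max of (index - first); B instead builds the digram list once, iterates over the SET of distinct digrams, and for each one recomputes its occurrence-position list and takes last-position minus first-position, maximizing per digram (a per-key aggregation instead of a streaming scan; O(n*k) for k distinct digrams instead of O(n)).
import Mathlib
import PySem

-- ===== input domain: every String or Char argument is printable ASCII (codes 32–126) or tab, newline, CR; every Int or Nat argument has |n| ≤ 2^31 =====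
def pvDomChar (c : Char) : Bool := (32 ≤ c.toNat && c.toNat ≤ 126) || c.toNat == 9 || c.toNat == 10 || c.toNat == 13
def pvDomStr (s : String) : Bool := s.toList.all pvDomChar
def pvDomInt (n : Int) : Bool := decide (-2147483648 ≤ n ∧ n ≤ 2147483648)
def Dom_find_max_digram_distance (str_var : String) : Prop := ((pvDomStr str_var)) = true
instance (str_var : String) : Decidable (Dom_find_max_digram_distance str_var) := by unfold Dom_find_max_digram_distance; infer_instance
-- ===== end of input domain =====

-- B replaces A's single interleaved first-occurrence/running-max scan by a per-digram
-- aggregation: collect the distinct digrams, and for each one take last-position minus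
-- first-position over its occurrence list; objective: alternative decomposition.


-- ===== PORT A =====
-- A's index loop 'for idx in range(len(s)-1): digram = s[idx:idx+2]' is rendered as a walk
-- over the enumerated adjacent-pair list (exact: the digram at idx is (cs[idx], cs[idx+1])).
def pvALoop : List (Int × (Char × Char)) → PySem.Dict (Char × Char) Int → Int → Int
  | [], _, m => m
  | (idx, dg) :: rest, d, m =>
    match d.get? dg with
    | some f => pvALoop rest d (max m (idx - f))
    | none => pvALoop rest (d.insert dg idx) m

def find_max_digram_distance (str_var : String) : Int :=
  let cs := str_var.toList
  if cs.length < 2 then -1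
  else
    let m := pvALoop (PySem.List.enumerate (cs.zip cs.tail) 0) PySem.Dict.empty 0
    if m > 0 then m else -1

-- ===== PORT B =====
-- _positions(digrams, d) = [i for i, e in enumerate(digrams) if e == d]
def pvPositions (digrams : List (Char × Char)) (d : Char × Char) : List Int :=
  (PySem.List.enumerate digrams 0).filterMap (fun p => if p.2 = d then some p.1 else none)

def find_max_digram_distance_alt (str_var : String) : Int :=
  let digrams := str_var.toList.zip str_var.toList.tail  -- list(zip(s, s[1:])): s[1:] is tail
  let best := (PySem.Set.ofList digrams).foldl (fun best d =>
    let pos := pvPositions digrams d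
    -- pos[-1] / pos[0]: pos is nonempty for every d drawn from set(digrams), so the
    -- IndexError default of .getD is never taken
    let span := (PySem.List.pyGet? pos (-1)).getD 0 - (PySem.List.pyGet? pos 0).getD 0
    if span > best then span else best) (-1)
  if best > 0 then best else -1

-- ===== PRECONDITION & SPEC =====
def Spec_find_max_digram_distance (str_var : String) (out : Int) : Prop := out = find_max_digram_distance_alt str_var
instance (str_var : String) (out : Int) : Decidable (Spec_find_max_digram_distance str_var out) := by unfold Spec_find_max_digram_distance; infer_instance

-- ===== CLAIM (what is proved, stated in full; the proofs are below) =====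
def Claim_equal_find_max_digram_distance : Prop := ∀ (str_var : String), Dom_find_max_digram_distance str_var → Spec_find_max_digram_distance str_var (find_max_digram_distance str_var)

-- ===== LEMMAS AND PROOFS =====

-- first / last occurrence index of a digram, the values B's pos[0] / pos[-1] read
def pvMn (L : List (Char × Char)) (d : Char × Char) : Int := ((pvPositions L d).head?).getD 0
def pvMx (L : List (Char × Char)) (d : Char × Char) : Int := ((pvPositions L d).getLast?).getD 0
def pvSpans (L : List (Char × Char)) : List Int :=
  (PySem.Set.ofList L).map (fun d => pvMx L d - pvMn L d)

-- A's loop as a fold over a (dict, max) state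
def pvStepA (st : PySem.Dict (Char × Char) Int × Int) (p : Int × (Char × Char)) :
    PySem.Dict (Char × Char) Int × Int :=
  match st.1.get? p.2 with
  | some f => (st.1, max st.2 (p.1 - f))
  | none => (st.1.insert p.2 p.1, st.2)

theorem pvALoop_eq_foldl (xs : List (Int × (Char × Char))) :
    ∀ d m, pvALoop xs d m = (xs.foldl pvStepA (d, m)).2 := by
  induction xs with
  | nil => intro d m; rfl
  | cons p rest ih =>
    intro d m
    obtain ⟨idx, dg⟩ := p
    simp only [pvALoop, List.foldl_cons]
    cases h : d.get? dg <;> simp [pvStepA, h, ih]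

theorem pvPositions_append (L : List (Char × Char)) (y d : Char × Char) :
    pvPositions (L ++ [y]) d
      = pvPositions L d ++ (if y = d then [(L.length : Int)] else []) := by
  unfold pvPositions
  rw [PySem.List.enumerate_append, List.filterMap_append]
  simp only [PySem.List.enumerate_cons, PySem.List.enumerate_nil, List.filterMap]
  by_cases h : y = d <;> simp [h]

theorem pvPositions_mem (L : List (Char × Char)) (d : Char × Char) (x : Int)
    (hx : x ∈ pvPositions L d) : 0 ≤ x ∧ x < L.length := by
  unfold pvPositions at hx
  obtain ⟨p, hp, hpe⟩ := List.mem_filterMap.1 hx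
  obtain ⟨k, hk, rfl⟩ := (PySem.List.mem_enumerate_iff _ _ _).1 hp
  by_cases h : L[k] = d
  · rw [if_pos h] at hpe
    cases hpe
    constructor <;> omega
  · rw [if_neg h] at hpe
    cases hpe

theorem pvPositions_ne_nil (L : List (Char × Char)) (d : Char × Char) (hd : d ∈ L) :
    pvPositions L d ≠ [] := by
  obtain ⟨k, hk, rfl⟩ := List.mem_iff_getElem.1 hd
  have hmem : ((0 : Int) + k, L[k]) ∈ PySem.List.enumerate L 0 :=
    (PySem.List.mem_enumerate_iff _ _ _).2 ⟨k, hk, rfl⟩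
  have : ((0 : Int) + k) ∈ pvPositions L L[k] := by
    unfold pvPositions
    exact List.mem_filterMap.2 ⟨_, hmem, by simp⟩
  exact List.ne_nil_of_mem this

theorem pvPositions_nil_of_not_mem (L : List (Char × Char)) (d : Char × Char)
    (hd : d ∉ L) : pvPositions L d = [] := by
  rw [List.eq_nil_iff_forall_not_mem]
  intro x hx
  unfold pvPositions at hx
  obtain ⟨p, hp, hpe⟩ := List.mem_filterMap.1 hx
  obtain ⟨k, hk, rfl⟩ := (PySem.List.mem_enumerate_iff _ _ _).1 hp
  by_cases h : L[k] = d
  · exact hd (h ▸ List.getElem_mem hk)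
  · rw [if_neg h] at hpe
    cases hpe

-- the head of the occurrence list never exceeds its last element
theorem pvPositions_head_le_last (L : List (Char × Char)) : ∀ (d : Char × Char) (h t : Int),
    (pvPositions L d).head? = some h → (pvPositions L d).getLast? = some t → h ≤ t := by
  induction L using List.reverseRecOn with
  | nil => intro d h t hh ht; simp [pvPositions, PySem.List.enumerate_nil] at hh
  | append_singleton L y ih =>
    intro d h t hh ht
    rw [pvPositions_append] at hh ht
    by_cases hyd : y = d
    · simp only [hyd, if_true] at hh ht
      rw [List.getLast?_concat] at ht
      cases ht
      cases hpos : (pvPositions L d).head? with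
      | none =>
        rw [List.head?_append, hpos] at hh
        simp at hh
        omega
      | some h0 =>
        rw [List.head?_append, hpos] at hh
        simp at hh
        subst hh
        have := pvPositions_mem L d h0 (List.mem_of_mem_head? hpos)
        omega
    · simp only [hyd, if_false, List.append_nil] at hh ht
      exact ih d h t hh ht

-- lookup in a dict built as a graph of f over a key list
theorem pv_get?_mk_graph (l : List (Char × Char)) (f : Char × Char → Int) (k : Char × Char) :
    (PySem.Dict.mk (l.map (fun d => (d, f d)))).get? k
      = if k ∈ l then some (f k) else none := by
  induction l with
  | nil => rfl
  | cons x rest ih =>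
    simp only [List.map_cons, PySem.Dict.get?_mk_cons]
    by_cases h : x = k
    · subst h; simp
    · simp [h, ih, Ne.symm h]

theorem pv_foldl_max_base (l : List Int) (a b : Int) :
    l.foldl max (max a b) = max a (l.foldl max b) := by
  induction l generalizing b with
  | nil => rfl
  | cons x rest ih =>
    simp only [List.foldl_cons]
    rw [max_assoc, ih]

-- replacing one entry of a running max by a larger value
theorem pv_fold_max_update (l : List (Char × Char)) (y : Char × Char) (f g : Char × Char → Int)
    (hnd : l.Nodup) (hy : y ∈ l) (hfg : ∀ d ∈ l, d ≠ y → g d = f d)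
    (hle : f y ≤ g y) :
    (l.map g).foldl max 0 = max ((l.map f).foldl max 0) (g y) := by
  induction l with
  | nil => cases hy
  | cons x rest ih =>
    simp only [List.map_cons, List.foldl_cons]
    rcases List.mem_cons.1 hy with rfl | hyr
    · have hrest : rest.map g = rest.map f := by
        apply List.map_congr_left
        intro d hd
        exact hfg d (List.mem_cons_of_mem _ hd) (fun hdy => (List.nodup_cons.1 hnd).1 (hdy ▸ hd))
      rw [hrest, max_comm 0 (g y), max_comm 0 (f y), pv_foldl_max_base, pv_foldl_max_base]
      rcases le_total (f y) ((rest.map f).foldl max 0) with h | h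
      · rcases le_total (g y) ((rest.map f).foldl max 0) with h2 | h2 <;>
          (simp [max_def]; omega)
      · simp [max_def]; omega
    · have hx : g x = f x :=
        hfg x (List.mem_cons_self) (fun hxy => (List.nodup_cons.1 hnd).1 (hxy ▸ hyr))
      rw [hx, max_comm 0 (f x), pv_foldl_max_base, pv_foldl_max_base,
        ih (List.nodup_cons.1 hnd).2 hyr (fun d hd => hfg d (List.mem_cons_of_mem _ hd)),
        max_assoc]

-- a fold of 'if v > best then v else best' is a running max
theorem pv_fold_if_max (l : List (Char × Char)) (f : Char × Char → Int) (a : Int) :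
    l.foldl (fun b d => if f d > b then f d else b) a = (l.map f).foldl max a := by
  induction l generalizing a with
  | nil => rfl
  | cons x rest ih =>
    simp only [List.foldl_cons, List.map_cons]
    have : (if f x > a then f x else a) = max a (f x) := by
      simp [max_def]; omega
    rw [this, ih]

theorem pv_ofList_append (L : List (Char × Char)) (y : Char × Char) :
    PySem.Set.ofList (L ++ [y])
      = if y ∈ L then PySem.Set.ofList L else PySem.Set.ofList L ++ [y] := by
  have h1 : PySem.Set.ofList (L ++ [y]) = PySem.Set.add (PySem.Set.ofList L) y := by
    simp [PySem.Set.ofList_eq_foldl]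
  rw [h1]
  by_cases hy : y ∈ L
  · simp [PySem.Set.add, PySem.Set.mem_ofList, hy]
  · simp [PySem.Set.add, PySem.Set.mem_ofList, hy]

-- first/last occurrence indices are stable under appending a later digram
theorem pvMn_append (L : List (Char × Char)) (y d : Char × Char) (hd : d ∈ L) :
    pvMn (L ++ [y]) d = pvMn L d := by
  unfold pvMn
  rw [pvPositions_append, List.head?_append]
  cases hpos : (pvPositions L d).head? with
  | none =>
    exact absurd (List.head?_eq_none_iff.1 hpos) (pvPositions_ne_nil L d hd)
  | some h0 => rfl

theorem pvMx_append_ne (L : List (Char × Char)) (y d : Char × Char) (hyd : y ≠ d) :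
    pvMx (L ++ [y]) d = pvMx L d := by
  unfold pvMx
  rw [pvPositions_append]
  simp [hyd]

-- the main loop invariant, by induction on the digram list from the right:
-- A's fold state after the whole list is (first-occurrence dict, max span)
theorem pv_main (L : List (Char × Char)) :
    (PySem.List.enumerate L 0).foldl pvStepA (PySem.Dict.empty, 0)
      = (PySem.Dict.mk ((PySem.Set.ofList L).map (fun d => (d, pvMn L d))),
         (pvSpans L).foldl max 0) := by
  induction L using List.reverseRecOn with
  | nil => rfl
  | append_singleton L y ih =>
    have henum : PySem.List.enumerate (L ++ [y]) 0
        = PySem.List.enumerate L 0 ++ [((L.length : Int), y)] := by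
      rw [PySem.List.enumerate_append]
      simp [PySem.List.enumerate_cons, PySem.List.enumerate_nil]
    rw [henum, List.foldl_append, ih]
    set n : Int := (L.length : Int) with hn
    by_cases hy : y ∈ L
    · -- repeated digram: dict unchanged, running max updated with n - first(y)
      have hget := pv_get?_mk_graph (PySem.Set.ofList L) (pvMn L) y
      rw [if_pos ((PySem.Set.mem_ofList _ _).2 hy)] at hget
      simp only [List.foldl_cons, List.foldl_nil, pvStepA, hget]
      rw [pv_ofList_append, if_pos hy]
      -- positions of y in L are nonempty
      obtain ⟨h0, hh0⟩ := Option.ne_none_iff_exists'.1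
        (fun hc => pvPositions_ne_nil L y hy (List.head?_eq_none_iff.1 hc))
      obtain ⟨t0, ht0⟩ := Option.ne_none_iff_exists'.1
        (fun hc => pvPositions_ne_nil L y hy (List.getLast?_eq_none_iff.1 hc))
      have hmem_h := pvPositions_mem L y h0 (List.mem_of_mem_head? hh0)
      have hmem_t := pvPositions_mem L y t0 (List.mem_of_mem_getLast? ht0)
      have hht := pvPositions_head_le_last L y h0 t0 hh0 ht0
      have hmn : pvMn L y = h0 := by unfold pvMn; rw [hh0]; rfl
      have hmx : pvMx L y = t0 := by unfold pvMx; rw [ht0]; rfl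
      have hmn' : pvMn (L ++ [y]) y = h0 := by rw [pvMn_append L y y hy, hmn]
      have hmx' : pvMx (L ++ [y]) y = n := by
        unfold pvMx
        rw [pvPositions_append, if_pos rfl, List.getLast?_concat]
        rfl
      rw [Prod.mk.injEq]
      constructor
      · -- dicts agree: pvMn is unchanged on every key of ofList L
        congr 1
        apply List.map_congr_left
        intro d hd
        rw [pvMn_append L y d ((PySem.Set.mem_ofList _ _).1 hd)]
      · -- running max: one span grew from (t0 - h0) to (n - h0)
        unfold pvSpans
        rw [pv_ofList_append, if_pos hy]
        rw [pv_fold_max_update (PySem.Set.ofList L) y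
              (fun d => pvMx L d - pvMn L d) (fun d => pvMx (L ++ [y]) d - pvMn (L ++ [y]) d)
              (PySem.Set.nodup_ofList _) ((PySem.Set.mem_ofList _ _).2 hy)
              (fun d hd hdy => by
                show pvMx (L ++ [y]) d - pvMn (L ++ [y]) d = pvMx L d - pvMn L d
                rw [pvMx_append_ne L y d (fun h => hdy h.symm),
                  pvMn_append L y d ((PySem.Set.mem_ofList _ _).1 hd)])
              (by show pvMx L y - pvMn L y ≤ pvMx (L ++ [y]) y - pvMn (L ++ [y]) y
                  rw [hmn, hmx, hmn', hmx']; omega)]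
        show max (List.foldl max 0 _) (n - pvMn L y) = max (List.foldl max 0 _) (pvMx (L ++ [y]) y - pvMn (L ++ [y]) y)
        rw [hmn', hmx', hmn]
    · -- new digram: dict gains (y, n), running max unchanged (the new span is 0)
      have hget := pv_get?_mk_graph (PySem.Set.ofList L) (pvMn L) y
      rw [if_neg (fun h => hy ((PySem.Set.mem_ofList _ _).1 h))] at hget
      simp only [List.foldl_cons, List.foldl_nil, pvStepA, hget]
      have hcont : (PySem.Dict.mk ((PySem.Set.ofList L).map (fun d => (d, pvMn L d)))).contains y = false := by
        rw [PySem.Dict.contains_eq_isSome_get?, hget]; rfl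
      have hins : (PySem.Dict.mk ((PySem.Set.ofList L).map (fun d => (d, pvMn L d)))).insert y n
          = PySem.Dict.mk ((PySem.Set.ofList L).map (fun d => (d, pvMn L d)) ++ [(y, n)]) :=
        PySem.Dict.ext (PySem.Dict.items_insert_of_not_contains _ _ hcont)
      rw [hins, pv_ofList_append, if_neg hy]
      have hposy : pvPositions (L ++ [y]) y = [n] := by
        rw [pvPositions_append, if_pos rfl, pvPositions_nil_of_not_mem L y hy]
        rfl
      have hmn' : pvMn (L ++ [y]) y = n := by unfold pvMn; rw [hposy]; rfl
      have hmx' : pvMx (L ++ [y]) y = n := by unfold pvMx; rw [hposy]; rfl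
      rw [Prod.mk.injEq]
      constructor
      · rw [List.map_append]
        have h1 : (PySem.Set.ofList L).map (fun d => (d, pvMn (L ++ [y]) d))
            = (PySem.Set.ofList L).map (fun d => (d, pvMn L d)) :=
          List.map_congr_left (fun d hd => by
            rw [pvMn_append L y d ((PySem.Set.mem_ofList _ _).1 hd)])
        rw [h1]
        simp [hmn']
      · unfold pvSpans
        rw [pv_ofList_append, if_neg hy, List.map_append]
        simp only [List.map_cons, List.map_nil, List.foldl_append, List.foldl_cons,
          List.foldl_nil, hmn', hmx']
        have hcong : (PySem.Set.ofList L).map (fun d => pvMx (L ++ [y]) d - pvMn (L ++ [y]) d)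
            = (PySem.Set.ofList L).map (fun d => pvMx L d - pvMn L d) := by
          apply List.map_congr_left
          intro d hd
          have hdL := (PySem.Set.mem_ofList _ _).1 hd
          rw [pvMx_append_ne L y d (fun h => hy (h ▸ hdL)), pvMn_append L y d hdL]
        rw [hcong]
        have h0le := (PySem.List.le_foldl_max ((PySem.Set.ofList L).map (fun d => pvMx L d - pvMn L d)) 0).1
        omega

-- B's fold over set(digrams) is the running max of the spans
theorem pv_alt_fold (L : List (Char × Char)) :
    (PySem.Set.ofList L).foldl (fun best d =>
        let pos := pvPositions L d
        let span := (PySem.List.pyGet? pos (-1)).getD 0 - (PySem.List.pyGet? pos 0).getD 0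
        if span > best then span else best) (-1)
      = (pvSpans L).foldl max (-1) := by
  have hfun : (fun best d =>
      let pos := pvPositions L d
      let span := (PySem.List.pyGet? pos (-1)).getD 0 - (PySem.List.pyGet? pos 0).getD 0
      if span > best then span else best)
      = (fun best d => if (fun d => pvMx L d - pvMn L d) d > best
          then (fun d => pvMx L d - pvMn L d) d else best) := by
    funext b d
    simp only [PySem.List.pyGet?_neg_one, PySem.List.pyGet?_zero, pvMx, pvMn,
      List.head?_eq_getElem?]
  rw [hfun, pv_fold_if_max]
  rfl

-- ===== VERDICT (by name: the statement is the Claim_ definition above) =====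
theorem find_max_digram_distance_spec : Claim_equal_find_max_digram_distance := by
  intro s _
  unfold Spec_find_max_digram_distance find_max_digram_distance find_max_digram_distance_alt
  simp only [pvALoop_eq_foldl, pv_main, pv_alt_fold]
  set L := s.toList.zip s.toList.tail with hL
  have hbase : (pvSpans L).foldl max 0 = max 0 ((pvSpans L).foldl max (-1)) := by
    have h := pv_foldl_max_base (pvSpans L) 0 (-1)
    norm_num at h
    exact h
  by_cases hlen : s.toList.length < 2
  · have hz : L = [] := by
      rw [hL]
      match h : s.toList with
      | [] => rfl
      | [c] => rfl
      | a :: b :: t => rw [h] at hlen; simp at hlen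
    simp [hz, pvSpans, PySem.Set.ofList]
  · rw [if_neg hlen, hbase]
    split_ifs with h1 h2 h2 <;> omega
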